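-- pv_equiv track=rewrite | github.com/riaz-ah/data-structures-and-algorithms | dsa.py | median_of_an_array
-- ===== SOURCE A (Python) =====
-- def median_of_an_array(list_of_numbers):
--     count=0
--     new_list_of_numbers= sorted(list_of_numbers)
--     y=len(new_list_of_numbers)
--     x = (y + 1) // 2 - 1  # Calculate the index of the median
--     median= new_list_of_numbers[x]
--     for i in range(x,y):
--         if new_list_of_numbers[i]==median:
--             count+=1
--     return count
-- ===== SOURCE B (Python) =====
-- def median_of_an_array(list_of_numbers):
--     x = (len(list_of_numbers) + 1) // 2 - 1
--     median = sorted(list_of_numbers)[x]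
--     below = sum(1 for v in list_of_numbers if v < median)
--     return list_of_numbers.count(median) + below - x
-- ===== Notes on version B (the rewrite author's own statement) =====
-- stated objective: alternative
-- what changed: B replaces A's scan of the sorted array from the median index with pure counting arithmetic over the unsorted input: count(median) + #(elements below median) - median_index.
import Mathlib
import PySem

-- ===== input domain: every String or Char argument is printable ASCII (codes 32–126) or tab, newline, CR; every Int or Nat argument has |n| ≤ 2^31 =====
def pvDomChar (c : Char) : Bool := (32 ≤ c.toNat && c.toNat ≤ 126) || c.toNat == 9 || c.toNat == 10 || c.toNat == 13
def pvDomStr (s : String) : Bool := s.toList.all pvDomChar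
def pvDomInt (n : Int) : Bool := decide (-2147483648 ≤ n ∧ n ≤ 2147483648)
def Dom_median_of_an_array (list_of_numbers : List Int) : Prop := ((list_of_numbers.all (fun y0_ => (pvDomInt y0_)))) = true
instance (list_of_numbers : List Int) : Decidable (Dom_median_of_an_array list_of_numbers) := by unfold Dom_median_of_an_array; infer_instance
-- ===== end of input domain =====

-- B computes the same count by pure counting arithmetic over the unsorted input
-- (count(median) + #below-median − median index) instead of A's scan of the sorted
-- array from the median index; objective: alternative (same asymptotic cost).

-- ===== PORT A =====
def median_of_an_array (list_of_numbers : List Int) : Int :=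
  let count : Int := 0
  let new_list_of_numbers := PySem.List.sorted list_of_numbers (fun v => v) false
  let y : Int := new_list_of_numbers.length
  let x : Int := PySem.Int.floordiv (y + 1) 2 - 1
  match PySem.List.pyGet? new_list_of_numbers x with
  | none => 0  -- IndexError on the empty list; excluded by Pre_
  | some median =>
    (PySem.List.pyRange x y 1).foldl
      (fun count i =>
        if PySem.List.pyGetD new_list_of_numbers i 0 = median then count + 1 else count)
      count

-- ===== PORT B =====
def median_of_an_array_alt (list_of_numbers : List Int) : Int :=
  let x : Int := PySem.Int.floordiv ((list_of_numbers.length : Int) + 1) 2 - 1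
  match PySem.List.pyGet? (PySem.List.sorted list_of_numbers (fun v => v) false) x with
  | none => 0  -- IndexError on the empty list; excluded by Pre_
  | some median =>
    let below : Int :=
      list_of_numbers.foldl (fun acc v => if v < median then acc + 1 else acc) 0
    (PySem.List.count list_of_numbers median : Int) + below - x

-- ===== PRECONDITION & SPEC =====
-- Pre_ excludes exactly the empty list, on which A raises IndexError.
def Pre_median_of_an_array (list_of_numbers : List Int) : Prop := list_of_numbers ≠ []
instance (list_of_numbers : List Int) : Decidable (Pre_median_of_an_array list_of_numbers) := by
  unfold Pre_median_of_an_array; infer_instance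
def pvWitness_median_of_an_array : List Int := [3, 1, 2, 1]

def Spec_median_of_an_array (list_of_numbers : List Int) (out : Int) : Prop := out = median_of_an_array_alt list_of_numbers
instance (list_of_numbers : List Int) (out : Int) : Decidable (Spec_median_of_an_array list_of_numbers out) := by unfold Spec_median_of_an_array; infer_instance

-- ===== CLAIM (what is proved, stated in full; the proofs are below) =====
def Claim_equal_median_of_an_array : Prop := ∀ (list_of_numbers : List Int), Dom_median_of_an_array list_of_numbers → Pre_median_of_an_array list_of_numbers → Spec_median_of_an_array list_of_numbers (median_of_an_array list_of_numbers)

-- ===== LEMMAS AND PROOFS =====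

-- A's loop over the tail of the sorted list counts occurrences of the median there.
theorem foldl_count_eq (m : Int) (xs : List Int) (c : Int) :
    xs.foldl (fun c v => if v = m then c + 1 else c) c = c + (xs.count m : Int) := by
  induction xs generalizing c with
  | nil => simp
  | cons a t ih =>
    by_cases h : a = m
    · simp [List.foldl_cons, h, ih]; ring
    · simp [List.foldl_cons, h, ih]

theorem foldl_countP_lt (m : Int) (xs : List Int) (c : Int) :
    xs.foldl (fun c v => if v < m then c + 1 else c) c = c + (xs.countP (fun v => v < m) : Int) := by
  induction xs generalizing c with
  | nil => simp
  | cons a t ih =>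
    by_cases h : a < m
    · simp [List.foldl_cons, h, ih]; ring
    · simp [List.foldl_cons, h, ih]

-- The counting identity: in a sorted list s with s[k] = m,
-- count of m from index k onward = count of m in s + #(elements < m) - k.
theorem count_drop_eq (s : List Int) (k : Nat) (hk : k < s.length)
    (hs : s.Pairwise (· ≤ ·)) :
    ((s.drop k).count s[k] : Int)
      = (s.count s[k] : Int) + (s.countP (fun v => v < s[k]) : Int) - k := by
  set m := s[k] with hm
  have hsplit : s = s.take k ++ s.drop k := (List.take_append_drop k s).symm
  have hdropc : s.drop k = m :: s.drop (k + 1) := List.drop_eq_getElem_cons hk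
  have hpw : (s.take k ++ s.drop k).Pairwise (· ≤ ·) := by rw [← hsplit]; exact hs
  rw [List.pairwise_append] at hpw
  obtain ⟨hpw1, hpw2, hcross⟩ := hpw
  -- every element of take k is ≤ m
  have hle : ∀ a ∈ s.take k, a ≤ m := by
    intro a ha
    exact hcross a ha m (by rw [hdropc]; exact List.mem_cons_self)
  -- every element of drop k is ≥ m
  have hge : ∀ a ∈ s.drop k, m ≤ a := by
    intro a ha
    rw [hdropc] at ha hpw2
    rcases List.mem_cons.mp ha with h | h
    · omega
    · exact (List.pairwise_cons.mp hpw2).1 a h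
  -- no element < m in drop k
  have hdrop0 : (s.drop k).countP (fun v => v < m) = 0 := by
    rw [List.countP_eq_zero]
    intro a ha
    simp only [decide_eq_true_eq, not_lt]
    exact hge a ha
  -- in take k: count of m + count of (< m) = k
  have hgen : ∀ t : List Int, (∀ a ∈ t, a ≤ m) →
      t.count m + t.countP (fun v => v < m) = t.length := by
    intro t
    induction t with
    | nil => simp
    | cons b u ihu =>
      intro hmem
      have hb : b ≤ m := hmem b List.mem_cons_self
      have hu := ihu (fun c hc => hmem c (List.mem_cons_of_mem b hc))
      rw [List.count_cons, List.countP_cons]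
      by_cases hbe : b = m
      · simp only [hbe]
        simp; omega
      · have hbl : b < m := lt_of_le_of_ne hb hbe
        simp [hbe, hbl]; omega
  have htake : (s.take k).count m + (s.take k).countP (fun v => v < m) = k := by
    have hlen : (s.take k).length = k := by
      rw [List.length_take]; omega
    rw [hgen (s.take k) hle, hlen]
  -- combine via s = take ++ drop
  have hcnt : s.count m = (s.take k).count m + (s.drop k).count m := by
    conv_lhs => rw [hsplit]
    rw [List.count_append]
  have hcp : s.countP (fun v => v < m) = (s.take k).countP (fun v => v < m) := by
    conv_lhs => rw [hsplit]
    rw [List.countP_append, hdrop0]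
    omega
  omega

theorem median_core (l : List Int) (hl : l ≠ []) :
    median_of_an_array l = median_of_an_array_alt l := by
  unfold median_of_an_array median_of_an_array_alt
  dsimp only
  set s := PySem.List.sorted l (fun v => v) false with hs
  have hperm : s.Perm l := PySem.List.sorted_perm l (fun v => v) false
  have hlen : s.length = l.length := hperm.length_eq
  have hne : s.length ≠ 0 := by
    rw [hlen]; simpa using fun h => hl (List.eq_nil_of_length_eq_zero h)
  set n := s.length with hn
  -- the index
  have hx : PySem.Int.floordiv ((n : Int) + 1) 2 - 1 = (((n + 1) / 2 - 1 : Nat) : Int) := by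
    have h1 : ((n : Int) + 1) = ((n + 1 : Nat) : Int) := by push_cast; ring
    rw [h1, PySem.Int.floordiv_eq_ediv_of_pos (by omega)]
    omega
  set k : Nat := (n + 1) / 2 - 1 with hkdef
  have hkn : k < n := by omega
  have hget : PySem.List.pyGet? s (PySem.Int.floordiv ((n : Int) + 1) 2 - 1) = some s[k] := by
    rw [hx, PySem.List.pyGet?_natCast]
    exact List.getElem?_eq_getElem hkn
  have hll : ((l.length : Int)) = ((n : Int)) := by rw [hlen]
  rw [hll, hget]
  dsimp only
  -- both matches take the some branch with median = s[k]
  set m := s[k] with hm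
  -- A's loop
  have hA :
      (PySem.List.pyRange (PySem.Int.floordiv ((n : Int) + 1) 2 - 1) (n : Int) 1).foldl
        (fun c i => if PySem.List.pyGetD s i 0 = m then c + 1 else c) 0
      = ((s.drop k).count m : Int) := by
    rw [hx]
    have h0 : (0 : Int) ≤ ((k : Nat) : Int) := by positivity
    rw [show ((n : Int)) = ((s.length : Int)) from by rw [hn]]
    rw [PySem.List.foldl_pyRange_pyGetD' s 0 (fun c v => if v = m then c + 1 else c) 0 h0]
    rw [Int.toNat_natCast]
    exact foldl_count_eq m (s.drop k) 0 |>.trans (by ring)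
  rw [hA]
  -- B's pieces
  have hB1 : (PySem.List.count l m : Int) = (s.count m : Int) := by
    rw [PySem.List.count_eq]
    exact_mod_cast congrArg Nat.cast (hperm.count_eq m).symm
  have hB2 : l.foldl (fun acc v => if v < m then acc + 1 else acc) 0
      = (s.countP (fun v => v < m) : Int) := by
    rw [foldl_countP_lt m l 0]
    have := hperm.countP_eq (fun v => decide (v < m))
    simp only [this]
    ring
  rw [hB1, hB2, hx]
  have hsorted : s.Pairwise (· ≤ ·) := by
    have := PySem.List.sorted_pairwise l (fun v => v)
    simpa using this
  have := count_drop_eq s k hkn hsorted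
  rw [← hm] at this
  rw [this]

-- ===== VERDICT (by name: the statement is the Claim_ definition above) =====
theorem median_of_an_array_spec : Claim_equal_median_of_an_array := by
  intro l _ hpre
  unfold Spec_median_of_an_array
  exact median_core l hpre
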